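-- pv_equiv track=rewrite | github.com/AshrafSenan/salmon-sacles-texture-segmentation | profile_extractor.py | get_profile_areas_color
-- ===== SOURCE A (Python) =====
-- def get_profile_areas_color(mask_ray):
--     """Trace the mask to determine where each band starts and end
--
--     Args:
--         mask_ray (array): The anterior ray of mask pixels
--
--     Returns:
--         2D array: decides where every band starts and the band colour
--     """
--     areas = []
--
--     #Record the first colour
--     current_color = mask_ray[0]
--     areas.append([0,current_color])
--
--     # Iterate through all the pixel
--     for i in range(1, len(mask_ray), 1):
--         #If the colour change, record the new colour and its starting index
--         if mask_ray[i] != current_color: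
--             current_color = mask_ray[i]
--             areas.append([i,current_color])
--         #Record the end of the rays
--         if i == len(mask_ray) - 1 :
--             areas.append([i,current_color])
--
--     return areas
-- ===== SOURCE B (Python) =====
-- def get_profile_areas_color(mask_ray):
--     """Band starts and colours by walking the ray one maximal run at a time."""
--     n = len(mask_ray)
--     areas = []
--     i = 0
--     while i < n:
--         areas.append([i, mask_ray[i]])
--         j = i + 1
--         while j < n and mask_ray[j] == mask_ray[i]:
--             j += 1
--         i = j
--     if n >= 2:
--         areas.append([n - 1, mask_ray[-1]])
--     return areas
-- ===== Notes on version B (the rewrite author's own statement) =====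
-- stated objective: alternative
-- what changed: Replaces A's stateful per-pixel loop (running current_color plus an in-loop end-of-ray index test) with a decomposition of the ray into maximal runs of equal colour — an outer loop per run with an inner skip over the run, emitting each run's start — followed by one conditional end-marker append.
-- outside the precondition, e.g. on get_profile_areas_color([]): A raises IndexError, B returns []
import Mathlib
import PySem

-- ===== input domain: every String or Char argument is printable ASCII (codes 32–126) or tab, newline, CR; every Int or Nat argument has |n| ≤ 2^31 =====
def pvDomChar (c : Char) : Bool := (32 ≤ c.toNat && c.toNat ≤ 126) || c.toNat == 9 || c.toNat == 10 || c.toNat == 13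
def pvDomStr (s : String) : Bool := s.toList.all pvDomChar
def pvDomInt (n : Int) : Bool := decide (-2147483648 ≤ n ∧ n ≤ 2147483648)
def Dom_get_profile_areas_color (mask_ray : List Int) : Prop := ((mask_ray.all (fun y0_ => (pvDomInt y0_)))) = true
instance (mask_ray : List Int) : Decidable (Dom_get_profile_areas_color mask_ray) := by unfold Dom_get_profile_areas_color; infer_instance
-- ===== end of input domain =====

-- B walks the ray one maximal run at a time instead of A's stateful per-pixel loop
-- (alternative decomposition; same cost).
-- A raises IndexError on the empty list (mask_ray[0]); Pre_ excludes exactly that input.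

-- ===== PORT A =====
-- loop body of A's 'for i in range(1, len(mask_ray), 1)' as a helper
def pvStepA (full : List Int) (st : Int × List (List Int)) (i : Int) : Int × List (List Int) :=
  let v := PySem.List.pyGetD full i 0
  let st := if v ≠ st.1 then (v, st.2 ++ [[i, v]]) else st
  if i = (full.length : Int) - 1 then (st.1, st.2 ++ [[i, st.1]]) else st

def get_profile_areas_color (mask_ray : List Int) : List (List Int) :=
  let current_color := PySem.List.pyGetD mask_ray 0 0   -- mask_ray[0]; Pre_ excludes the empty list
  let areas : List (List Int) := [[0, current_color]]
  ((PySem.List.pyRange 1 (mask_ray.length : Int) 1).foldl (pvStepA mask_ray) (current_color, areas)).2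

-- ===== PORT B =====
-- Source B's outer 'while' walks the ray one maximal run at a time: ported as recursion on the
-- remaining suffix (the inner counting 'while' is takeWhile-length, exact for that loop);
-- the fuel argument (initially the list length, always sufficient) only makes the recursion structural.
def pvRunsF : Nat → List Int → Int → List (List Int)
  | _, [], _ => []
  | 0, _ :: _, _ => []
  | fuel + 1, x :: rest, start =>
      let m := (rest.takeWhile (fun y => y = x)).length
      [start, x] :: pvRunsF fuel (rest.drop m) (start + ((m : Int) + 1))

def get_profile_areas_color_alt (mask_ray : List Int) : List (List Int) :=
  let areas := pvRunsF mask_ray.length mask_ray 0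
  if 2 ≤ (mask_ray.length : Int) then
    areas ++ [[(mask_ray.length : Int) - 1, PySem.List.pyGetD mask_ray (-1) 0]]
  else areas

-- ===== PRECONDITION & SPEC =====
-- A raises IndexError on [] (mask_ray[0]); that single input is excluded.
def Pre_get_profile_areas_color (mask_ray : List Int) : Prop := mask_ray ≠ []
instance (mask_ray : List Int) : Decidable (Pre_get_profile_areas_color mask_ray) := by unfold Pre_get_profile_areas_color; infer_instance
def pvWitness_get_profile_areas_color : List Int := [1, 1, 2]

def Spec_get_profile_areas_color (mask_ray : List Int) (out : List (List Int)) : Prop := out = get_profile_areas_color_alt mask_ray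
instance (mask_ray : List Int) (out : List (List Int)) : Decidable (Spec_get_profile_areas_color mask_ray out) := by unfold Spec_get_profile_areas_color; infer_instance

-- ===== CLAIM (what is proved, stated in full; the proofs are below) =====
def Claim_equal_get_profile_areas_color : Prop := ∀ (mask_ray : List Int), Dom_get_profile_areas_color mask_ray → Pre_get_profile_areas_color mask_ray → Spec_get_profile_areas_color mask_ray (get_profile_areas_color mask_ray)

-- ===== LEMMAS AND PROOFS =====

-- colour-change records of the run c :: xs, first index s (characterisation shared by both ports)
def pvChg (c : Int) (xs : List Int) (s : Int) : List (List Int) :=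
  match xs with
  | [] => []
  | x :: xs => (if x ≠ c then [[s, x]] else []) ++ pvChg x xs (s + 1)

-- pvChg skips a leading block of elements equal to c
lemma pvChg_skip (xs : List Int) : ∀ (c s : Int),
    pvChg c xs s = pvChg c (xs.drop (xs.takeWhile (fun y => y = c)).length)
      (s + ((xs.takeWhile (fun y => y = c)).length : Int)) := by
  induction xs with
  | nil => intro c s; simp
  | cons x t ih =>
    intro c s
    by_cases h : x = c
    · subst h
      rw [pvChg, if_neg (by simp), List.nil_append, ih x (s + 1)]
      have ht : (x :: t).takeWhile (fun y => y = x) = x :: t.takeWhile (fun y => y = x) := by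
        simp
      rw [ht]
      simp only [List.length_cons, List.drop_succ_cons]
      congr 1
      push_cast; ring
    · simp [h]

-- B's run decomposition produces exactly the head record followed by the change records
lemma pvRunsF_eq : ∀ (f : Nat) (tl : List Int) (c s : Int), tl.length ≤ f →
    pvRunsF (f + 1) (c :: tl) s = [s, c] :: pvChg c tl (s + 1) := by
  intro f
  induction f with
  | zero =>
    intro tl c s h
    have : tl = [] := List.eq_nil_of_length_eq_zero (Nat.le_zero.mp h)
    subst this; simp [pvRunsF, pvChg]
  | succ n ih =>
    intro tl c s h
    rw [pvRunsF]
    congr 1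
    set m := (tl.takeWhile (fun y => y = c)).length with hm
    rw [pvChg_skip tl c (s + 1)]
    have hdw : tl.drop m = tl.dropWhile (fun y => y = c) := by
      conv_lhs => rw [← List.takeWhile_append_dropWhile (p := fun y => decide (y = c)) (l := tl)]
      rw [hm]
      exact List.drop_left
    cases hd : tl.drop m with
    | nil => simp [pvRunsF, pvChg]
    | cons x rest =>
      have hx : x ≠ c := by
        have h2 := List.head?_dropWhile_not (fun y => decide (y = c)) tl
        rw [← hdw, hd] at h2
        simpa using h2
      have hlen : rest.length ≤ n := by
        have hdl := congrArg List.length hd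
        simp [List.length_drop] at hdl
        omega
      rw [ih rest x (s + ((m : Int) + 1)) hlen, pvChg, if_pos hx]
      have harith : s + ((m : Int) + 1) = s + 1 + (m : Int) := by ring
      simp [harith, ← hm]

lemma pvRunsF_top (c : Int) (tl : List Int) (s : Int) :
    pvRunsF ((c :: tl).length) (c :: tl) s = [s, c] :: pvChg c tl (s + 1) :=
  pvRunsF_eq tl.length tl c s (le_refl _)

lemma pvChg_append (xs : List Int) : ∀ (c s z : Int),
    pvChg c (xs ++ [z]) s
      = pvChg c xs s ++ (if z ≠ xs.getLastD c then [[s + (xs.length : Int), z]] else []) := by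
  induction xs with
  | nil => intro c s z; simp [pvChg]
  | cons x t ih =>
    intro c s z
    simp only [List.cons_append, pvChg, ih, List.getLastD_cons, List.length_cons]
    have : s + ((t.length + 1 : Nat) : Int) = s + 1 + (t.length : Int) := by push_cast; ring
    rw [this, List.append_assoc]

lemma pvMid (c : Int) (tl : List Int) : ∀ (m : Nat), 1 ≤ m → m ≤ tl.length →
    (PySem.List.pyRange 1 (m : Int) 1).foldl (pvStepA (c :: tl)) (c, [[0, c]])
      = ((tl.take (m - 1)).getLastD c, [[0, c]] ++ pvChg c (tl.take (m - 1)) 1) := by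
  intro m
  induction m with
  | zero => omega
  | succ m ih =>
    intro _ hle
    by_cases hm : m = 0
    · subst hm
      rw [show ((1 : Nat) : Int) = 1 by norm_num, PySem.List.pyRange_one_eq_nil (by norm_num)]
      simp [pvChg]
    · have h1m : 1 ≤ m := by omega
      have hmlt : m < tl.length := by omega
      have hcast : ((m + 1 : Nat) : Int) = (m : Int) + 1 := by push_cast; ring
      rw [hcast, PySem.List.pyRange_one_succ_right (by exact_mod_cast h1m),
          List.foldl_append, ih h1m (by omega)]
      have hget : tl[m - 1]? = some tl[m - 1] := List.getElem?_eq_getElem (by omega)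
      have htake : tl.take m = tl.take (m - 1) ++ [tl[m - 1]] := by
        conv_lhs => rw [show m = (m - 1) + 1 by omega]
        rw [List.take_add_one, hget]
        rfl
      have hv : PySem.List.pyGetD (c :: tl) (m : Int) 0 = tl[m - 1] := by
        rw [PySem.List.pyGetD_natCast]
        obtain ⟨k, rfl⟩ : ∃ k, m = k + 1 := ⟨m - 1, by omega⟩
        simp [List.getD_eq_getElem?_getD, List.getElem?_cons_succ,
              List.getElem?_eq_getElem (show k < tl.length by omega)]
      have hne : (m : Int) ≠ ((c :: tl).length : Int) - 1 := by
        push_cast [List.length_cons]; omega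
      have hlen : ((tl.take (m - 1)).length : Int) = (m : Int) - 1 := by
        rw [List.length_take]; push_cast; omega
      simp only [List.foldl_cons, List.foldl_nil, pvStepA, hv]
      rw [if_neg hne, show m + 1 - 1 = m from rfl, htake, pvChg_append,
          show (1 : Int) + ((tl.take (m - 1)).length : Int) = (m : Int) by omega]
      by_cases hch : tl[m - 1] = (tl.take (m - 1)).getLastD c
      · simp [hch, List.getLastD_eq_getLast?]
      · simp only [ne_eq, List.getLastD_eq_getLast?] at hch ⊢
        rw [if_pos hch, if_pos hch, List.getLast?_concat]
        simp [List.append_assoc]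

lemma pvMain (c : Int) (tl : List Int) (hne : tl ≠ []) :
    get_profile_areas_color (c :: tl) = get_profile_areas_color_alt (c :: tl) := by
  have h1 : 1 ≤ tl.length := List.length_pos_iff.mpr hne
  have hsplit : PySem.List.pyRange 1 (((c :: tl).length : Int)) 1
      = PySem.List.pyRange 1 ((tl.length : Int)) 1 ++ [(tl.length : Int)] := by
    have h : (((c :: tl).length : Int)) = (tl.length : Int) + 1 := by
      push_cast [List.length_cons]; ring
    rw [h, PySem.List.pyRange_one_succ_right (by exact_mod_cast h1)]
  have hdl : tl.dropLast ++ [tl.getLast hne] = tl := List.dropLast_append_getLast hne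
  have hdltake : tl.dropLast = tl.take (tl.length - 1) := by
    rw [List.dropLast_eq_take]
  have hlast : PySem.List.pyGetD (c :: tl) ((tl.length : Int)) 0 = tl.getLast hne := by
    rw [PySem.List.pyGetD_natCast]
    obtain ⟨k, hk⟩ : ∃ k, tl.length = k + 1 := ⟨tl.length - 1, by omega⟩
    rw [hk]
    simp [List.getD_eq_getElem?_getD, List.getLast_eq_getElem, hk]
  have hneg : PySem.List.pyGetD (c :: tl) (-1) 0 = tl.getLast hne := by
    rw [PySem.List.pyGetD_neg_one (xs := c :: tl) (by simp) (d := 0)]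
    exact List.getLast_cons hne
  unfold get_profile_areas_color get_profile_areas_color_alt
  simp only [PySem.List.pyGetD_zero_cons]
  rw [hsplit, List.foldl_append, pvMid c tl tl.length h1 (le_refl _)]
  rw [pvRunsF_top c tl 0]
  simp only [zero_add]
  have hif : (2 : Int) ≤ (((c :: tl).length : Int)) := by
    push_cast [List.length_cons]; omega
  rw [if_pos hif]
  have hcond : ((tl.length : Int)) = (((c :: tl).length : Int)) - 1 := by
    push_cast [List.length_cons]; ring
  have hchg : pvChg c tl 1
      = pvChg c (tl.take (tl.length - 1)) 1
        ++ (if tl.getLast hne ≠ (tl.take (tl.length - 1)).getLastD c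
            then [[(1 : Int) + ((tl.take (tl.length - 1)).length : Int), tl.getLast hne]] else []) := by
    conv_lhs => rw [← hdl, hdltake]
    exact pvChg_append _ c 1 _
  have hlen2 : ((1 : Int) + ((tl.take (tl.length - 1)).length : Int)) = (tl.length : Int) := by
    rw [List.length_take]; push_cast; omega
  simp only [List.foldl_cons, List.foldl_nil, pvStepA, hlast]
  rw [if_pos hcond, hchg, hlen2]
  by_cases hch : tl.getLast hne = (tl.take (tl.length - 1)).getLast?.getD c
  · simp [hch, hneg]
  · simp [hch, hneg, List.append_assoc]

-- ===== VERDICT (by name: the statement is the Claim_ definition above) =====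
theorem get_profile_areas_color_spec : Claim_equal_get_profile_areas_color := by
  intro mask_ray _ hpre
  unfold Spec_get_profile_areas_color
  cases mask_ray with
  | nil => simp [Pre_get_profile_areas_color] at hpre
  | cons c tl =>
    cases tl with
    | nil =>
      simp [get_profile_areas_color, get_profile_areas_color_alt, pvRunsF,
            PySem.List.pyRange_one_eq_nil (le_refl (1 : Int))]
    | cons t tl' => exact pvMain c (t :: tl') (by simp)
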